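-- pv_equiv track=rewrite | github.com/FueTsui/RcloneLink | RcloneLink.py | remove_existing_remote
-- ===== SOURCE A (Python) =====
-- def remove_existing_remote(config_content: str, remote_name: str) -> str:
--     """从配置中移除已存在的远程"""
--     lines = config_content.split('\n')
--     result_lines = []
--     skip_section = False
--
--     for line in lines:
--         if line.strip().startswith('[') and line.strip().endswith(']'):
--             section_name = line.strip()[1:-1]
--             skip_section = (section_name == remote_name)
--
--         if not skip_section:
--             result_lines.append(line)
--
--     return '\n'.join(result_lines)
-- ===== SOURCE B (Python) =====
-- def remove_existing_remote(config_content: str, remote_name: str) -> str: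
--     """Two-phase: partition lines into named sections, then drop sections named remote_name."""
--     lines = config_content.split('\n')
--     groups = []          # list of (section_name_or_None, lines_of_group)
--     cur_name = None
--     cur = []
--     for line in lines:
--         s = line.strip()
--         if s.startswith('[') and s.endswith(']'):
--             groups.append((cur_name, cur))
--             cur_name = s[1:-1]
--             cur = [line]
--         else:
--             cur.append(line)
--     groups.append((cur_name, cur))
--     kept = [ln for name, grp in groups if name != remote_name for ln in grp]
--     return '\n'.join(kept)
-- ===== Notes on version B (the rewrite author's own statement) =====
-- stated objective: alternative
-- what changed: Replaces A's skip_section boolean state machine with a two-phase decomposition: one pass partitions the lines into (section-name, lines) groups, then whole groups named remote_name are filtered out and the rest flattened and rejoined.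
import Mathlib
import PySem

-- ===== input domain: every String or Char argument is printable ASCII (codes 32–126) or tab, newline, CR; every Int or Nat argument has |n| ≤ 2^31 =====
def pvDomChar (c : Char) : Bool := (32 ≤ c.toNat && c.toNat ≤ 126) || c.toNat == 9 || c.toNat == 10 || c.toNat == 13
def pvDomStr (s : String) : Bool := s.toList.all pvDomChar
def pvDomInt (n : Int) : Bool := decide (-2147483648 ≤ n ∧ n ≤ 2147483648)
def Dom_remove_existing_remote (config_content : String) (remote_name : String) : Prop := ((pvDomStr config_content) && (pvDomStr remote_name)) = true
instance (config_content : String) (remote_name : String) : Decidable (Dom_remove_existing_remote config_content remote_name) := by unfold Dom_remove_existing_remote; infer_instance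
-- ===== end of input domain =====

-- B replaces A's skip_section state machine by a two-phase decomposition (group the lines into
-- sections, then filter out whole sections named remote_name); objective: alternative decomposition.

-- ===== PORT A =====
-- '\n' is a nonempty separator, so split? is always some; .getD [] is exact for str.split('\n').
def remove_existing_remote (config_content : String) (remote_name : String) : String :=
  let lines := (PySem.Str.split? config_content "\n").getD []
  let st := lines.foldl (fun (st : List String × Bool) line =>
      let st1 :=
        if PySem.Str.startswith (PySem.Str.strip line) "[" &&
           PySem.Str.endswith (PySem.Str.strip line) "]" then
          let section_name := PySem.Str.slice (PySem.Str.strip line) (some 1) (some (-1))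
          (st.1, section_name == remote_name)
        else st
      if !st1.2 then (st1.1 ++ [line], st1.2) else st1)
    ([], false)
  PySem.Str.join "\n" st.1

-- ===== PORT B =====
def remove_existing_remote_alt (config_content : String) (remote_name : String) : String :=
  let lines := (PySem.Str.split? config_content "\n").getD []
  let st := lines.foldl
    (fun (st : List (Option String × List String) × Option String × List String) line =>
      let s := PySem.Str.strip line
      if PySem.Str.startswith s "[" && PySem.Str.endswith s "]" then
        (st.1 ++ [(st.2.1, st.2.2)], some (PySem.Str.slice s (some 1) (some (-1))), [line])
      else
        (st.1, st.2.1, st.2.2 ++ [line]))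
    ([], none, [])
  let groups := st.1 ++ [(st.2.1, st.2.2)]
  let kept := (groups.filter (fun g => g.1 != some remote_name)).flatMap (·.2)
  PySem.Str.join "\n" kept

-- ===== PRECONDITION & SPEC =====
def Spec_remove_existing_remote (config_content : String) (remote_name : String) (out : String) : Prop := out = remove_existing_remote_alt config_content remote_name
instance (config_content : String) (remote_name : String) (out : String) : Decidable (Spec_remove_existing_remote config_content remote_name out) := by unfold Spec_remove_existing_remote; infer_instance

-- ===== CLAIM (what is proved, stated in full; the proofs are below) =====
def Claim_equal_remove_existing_remote : Prop := ∀ (config_content : String) (remote_name : String), Dom_remove_existing_remote config_content remote_name → Spec_remove_existing_remote config_content remote_name (remove_existing_remote config_content remote_name)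

-- ===== LEMMAS AND PROOFS =====

-- Whether a line is a section header, and the section name it carries (both programs compute these identically).
def pvIsHeader (l : String) : Bool :=
  PySem.Str.startswith (PySem.Str.strip l) "[" && PySem.Str.endswith (PySem.Str.strip l) "]"

def pvName (l : String) : String :=
  PySem.Str.slice (PySem.Str.strip l) (some 1) (some (-1))

-- A's loop, accumulator-free.
def pvALoop (r : String) : List String → Bool → List String
  | [], _ => []
  | l :: rest, skip =>
    if pvIsHeader l then
      (if pvName l == r then [] else [l]) ++ pvALoop r rest (pvName l == r)
    else
      (if skip then [] else [l]) ++ pvALoop r rest skip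

-- B's grouping pass, accumulator-free.
def pvGLoop : List String → Option String → List String → List (Option String × List String)
  | [], n, c => [(n, c)]
  | l :: rest, n, c =>
    if pvIsHeader l then (n, c) :: pvGLoop rest (some (pvName l)) [l]
    else pvGLoop rest n (c ++ [l])

-- A's foldl, for ANY step function with A's pointwise behaviour, appends pvALoop to the accumulator.
theorem pvA_fold (r : String) (step : (List String × Bool) → String → (List String × Bool))
    (hstep : ∀ res skip l, step (res, skip) l =
      (res ++ (if pvIsHeader l then (if pvName l == r then [] else [l])
               else if skip then [] else [l]),
       if pvIsHeader l then (pvName l == r) else skip)) :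
    ∀ (lines : List String) (res : List String) (skip : Bool),
      (lines.foldl step (res, skip)).1 = res ++ pvALoop r lines skip := by
  intro lines
  induction lines with
  | nil => intro res skip; simp [pvALoop]
  | cons l rest ih =>
    intro res skip
    rw [List.foldl_cons, hstep, pvALoop]
    cases hh : pvIsHeader l <;> cases hm : (pvName l == r) <;> cases skip <;>
      simp [ih, List.append_assoc]

-- B's foldl, for ANY step function with B's pointwise behaviour, appends pvGLoop's groups.
theorem pvB_fold
    (step : (List (Option String × List String) × Option String × List String) → String →
            (List (Option String × List String) × Option String × List String))
    (hstep : ∀ gs n c l, step (gs, n, c) l =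
      if pvIsHeader l then (gs ++ [(n, c)], some (pvName l), [l]) else (gs, n, c ++ [l])) :
    ∀ (lines : List String) (gs : List (Option String × List String)) (n : Option String)
      (c : List String),
      (lines.foldl step (gs, n, c)).1 ++
        [((lines.foldl step (gs, n, c)).2.1, (lines.foldl step (gs, n, c)).2.2)]
        = gs ++ pvGLoop lines n c := by
  intro lines
  induction lines with
  | nil => intro gs n c; simp [pvGLoop]
  | cons l rest ih =>
    intro gs n c
    rw [List.foldl_cons, hstep, pvGLoop]
    cases hh : pvIsHeader l <;> simp [ih, List.append_assoc]

-- Filtering-and-flattening B's groups yields exactly A's loop output.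
theorem pvMain (r : String) (lines : List String) : ∀ (n : Option String) (c : List String),
    ((pvGLoop lines n c).filter (fun g => !(g.1 == some r))).flatMap (·.2)
      = (if n == some r then [] else c) ++ pvALoop r lines (n == some r) := by
  induction lines with
  | nil => intro n c; cases hn : (n == some r) <;> simp [pvGLoop, pvALoop, hn]
  | cons l rest ih =>
    intro n c
    rw [pvGLoop, pvALoop]
    cases hh : pvIsHeader l with
    | false =>
      simp only [Bool.false_eq_true, if_false]
      rw [ih]
      cases hn : (n == some r) <;> simp [List.append_assoc]
    | true =>
      simp only [if_true]
      rw [List.filter_cons]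
      cases hn : (n == some r) <;> cases hm : (pvName l == r) <;>
        simp [hm, ih]

-- ===== VERDICT (by name: the statement is the Claim_ definition above) =====
theorem remove_existing_remote_spec : Claim_equal_remove_existing_remote := by
  intro config_content remote_name _
  unfold Spec_remove_existing_remote remove_existing_remote remove_existing_remote_alt
  dsimp only
  simp only [bne]
  rw [pvA_fold remote_name _ ?hA, pvB_fold _ ?hB]
  · simp only [List.nil_append]
    rw [pvMain]
    simp
  case hA =>
    intro res skip l
    dsimp only
    rw [show pvIsHeader l = (PySem.Str.startswith (PySem.Str.strip l) "[" &&
          PySem.Str.endswith (PySem.Str.strip l) "]") from rfl,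
        show pvName l = PySem.Str.slice (PySem.Str.strip l) (some 1) (some (-1)) from rfl]
    cases hh : (PySem.Str.startswith (PySem.Str.strip l) "[" &&
                PySem.Str.endswith (PySem.Str.strip l) "]") <;>
      cases hm : (PySem.Str.slice (PySem.Str.strip l) (some 1) (some (-1)) == remote_name) <;>
        cases skip <;> first | rfl | simp
  case hB =>
    intro gs n c l
    dsimp only
    rw [show pvIsHeader l = (PySem.Str.startswith (PySem.Str.strip l) "[" &&
          PySem.Str.endswith (PySem.Str.strip l) "]") from rfl,
        show pvName l = PySem.Str.slice (PySem.Str.strip l) (some 1) (some (-1)) from rfl]
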